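-- pv_equiv track=rewrite | github.com/Eshan05/SemIII-Lab-SPPU | DSL/A/A1Pure.py | neither
-- ===== SOURCE A (Python) =====
-- def neither(cricket, badminton, football):
--   # Returns the number of students who play neither cricket nor badminton.
--   all_students = []
--
--   # Collect all students from cricket
--   for i in range(len(cricket)):
--     if cricket[i] not in all_students:
--       all_students.append(cricket[i])
--
--   for i in range(len(badminton)):
--     if badminton[i] not in all_students:
--       all_students.append(badminton[i])
--
--   for i in range(len(football)):
--     if football[i] not in all_students:
--       all_students.append(football[i])
--
--   count_neither = 0
--   for i in range(len(all_students)):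
--     if all_students[i] not in cricket and all_students[i] not in badminton:
--       count_neither += 1
--
--   return count_neither
-- ===== SOURCE B (Python) =====
-- def neither(cricket, badminton, football):
--     # Set-based: the answer is the number of distinct football entries
--     # absent from cricket and badminton; no three-list union is built.
--     c = set(cricket)
--     b = set(badminton)
--     return len({f for f in football if f not in c and f not in b})
-- ===== Notes on version B (the rewrite author's own statement) =====
-- stated objective: faster
-- what changed: B never builds the union of the three lists: it hashes cricket and badminton into sets and counts the distinct football entries in neither, replacing A's quadratic list-membership dedup with set operations.
import Mathlib
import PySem

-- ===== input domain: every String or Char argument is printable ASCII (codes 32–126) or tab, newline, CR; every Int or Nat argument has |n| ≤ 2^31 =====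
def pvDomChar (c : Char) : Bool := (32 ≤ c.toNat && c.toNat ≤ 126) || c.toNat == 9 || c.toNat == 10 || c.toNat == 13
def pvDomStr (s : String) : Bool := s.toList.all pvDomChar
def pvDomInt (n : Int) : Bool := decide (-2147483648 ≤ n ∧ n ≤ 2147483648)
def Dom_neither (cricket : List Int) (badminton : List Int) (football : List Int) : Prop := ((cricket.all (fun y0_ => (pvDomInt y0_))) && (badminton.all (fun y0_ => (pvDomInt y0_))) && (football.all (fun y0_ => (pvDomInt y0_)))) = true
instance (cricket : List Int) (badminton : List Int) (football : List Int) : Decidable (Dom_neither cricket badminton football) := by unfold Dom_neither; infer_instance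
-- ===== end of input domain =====

-- B replaces A's quadratic list-membership dedup of the three-list union by set
-- operations over football alone (objective: faster, linear expected time).

-- ===== PORT A =====
def neither (cricket : List Int) (badminton : List Int) (football : List Int) : Int :=
  -- all_students built by three dedup loops (x not in all_students → append)
  let s1 := cricket.foldl (fun acc x => if acc.contains x then acc else acc ++ [x]) ([] : List Int)
  let s2 := badminton.foldl (fun acc x => if acc.contains x then acc else acc ++ [x]) s1
  let s3 := football.foldl (fun acc x => if acc.contains x then acc else acc ++ [x]) s2
  -- counting loop
  s3.foldl (fun n x => if !cricket.contains x && !badminton.contains x then n + 1 else n) (0 : Int)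

-- ===== PORT B =====
def neither_alt (cricket : List Int) (badminton : List Int) (football : List Int) : Int :=
  let c : PySem.Set Int := PySem.Set.ofList cricket
  let b : PySem.Set Int := PySem.Set.ofList badminton
  PySem.Set.len (PySem.Set.ofList (football.filter (fun f => !(PySem.Set.contains c f) && !(PySem.Set.contains b f))))

-- ===== PRECONDITION & SPEC =====
def Spec_neither (cricket : List Int) (badminton : List Int) (football : List Int) (out : Int) : Prop := out = neither_alt cricket badminton football
instance (cricket : List Int) (badminton : List Int) (football : List Int) (out : Int) : Decidable (Spec_neither cricket badminton football out) := by unfold Spec_neither; infer_instance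

-- ===== CLAIM (what is proved, stated in full; the proofs are below) =====
def Claim_equal_neither : Prop := ∀ (cricket : List Int) (badminton : List Int) (football : List Int), Dom_neither cricket badminton football → Spec_neither cricket badminton football (neither cricket badminton football)

-- ===== LEMMAS AND PROOFS =====

-- A's hand-written dedup step is exactly PySem.Set.add, so its loops are Set.update
theorem dedup_foldl_eq_update (s : List Int) (l : List Int) :
    l.foldl (fun acc x => if acc.contains x then acc else acc ++ [x]) s = PySem.Set.update s l := by
  rfl

theorem neither_spec_aux (cricket badminton football : List Int) :
    neither cricket badminton football = neither_alt cricket badminton football := by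
  unfold neither neither_alt
  show _ = PySem.Set.len (PySem.Set.ofList (football.filter
    (fun f => !(PySem.Set.contains (PySem.Set.ofList cricket) f)
      && !(PySem.Set.contains (PySem.Set.ofList badminton) f))))
  rw [PySem.List.foldl_count_if]
  set p : Int → Bool := fun x => !cricket.contains x && !badminton.contains x with hp
  have hpred : (fun f => !(PySem.Set.contains (PySem.Set.ofList cricket) f)
      && !(PySem.Set.contains (PySem.Set.ofList badminton) f)) = p := by
    funext x
    by_cases hc : x ∈ cricket <;> by_cases hb : x ∈ badminton <;>
      simp [hp, PySem.Set.contains_eq_listContains, PySem.Set.mem_ofList, hc, hb]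
  rw [hpred]
  have hpm : ∀ x : Int, p x = true ↔ x ∉ cricket ∧ x ∉ badminton := by
    intro x; simp [hp]
  have hS3 : football.foldl (fun acc x => if acc.contains x then acc else acc ++ [x])
      (badminton.foldl (fun acc x => if acc.contains x then acc else acc ++ [x])
        (cricket.foldl (fun acc x => if acc.contains x then acc else acc ++ [x]) ([] : List Int)))
      = PySem.Set.update (PySem.Set.update (PySem.Set.ofList cricket) badminton) football :=
    dedup_foldl_eq_update _ _
  rw [hS3]
  set S3 := PySem.Set.update (PySem.Set.update (PySem.Set.ofList cricket) badminton) football with hS3d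
  have hnd : S3.Nodup :=
    PySem.Set.nodup_update _ _ (PySem.Set.nodup_update _ _ (PySem.Set.nodup_ofList _))
  have hperm : (S3.filter p).Perm (PySem.Set.ofList (football.filter p)) := by
    rw [List.perm_ext_iff_of_nodup (hnd.filter p) (PySem.Set.nodup_ofList _)]
    intro x
    simp only [List.mem_filter, PySem.Set.mem_ofList, hS3d, PySem.Set.mem_update]
    constructor
    · rintro ⟨hmem, hpx⟩
      rcases (hpm x).1 hpx with ⟨hc, hb⟩
      rcases hmem with (h | h) | h
      · exact absurd h hc
      · exact absurd h hb
      · exact ⟨h, hpx⟩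
    · rintro ⟨hf, hpx⟩
      exact ⟨Or.inr hf, hpx⟩
  have hlen : List.countP p S3 = (PySem.Set.ofList (football.filter p)).length := by
    rw [List.countP_eq_length_filter]
    exact hperm.length_eq
  simp [PySem.Set.len, hlen]

-- ===== VERDICT (by name: the statement is the Claim_ definition above) =====
theorem neither_spec : Claim_equal_neither := by
  intro c b f _
  exact neither_spec_aux c b f
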